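-- pv_equiv track=rewrite | github.com/superkaiba/make-evil-dumb | scripts/build_issue260_data.py | _truncate_multiturn
-- ===== SOURCE A (Python) =====
-- def _truncate_multiturn(messages: list[dict], max_pairs: int) -> list[dict]:
--     """Drop the FIRST k turn-pairs until <= max_pairs remain (plan §3.2).
--
--     `messages` is [system, user_1, asst_1, ..., user_N, asst_N]. We always
--     keep the system message, then keep the LAST `max_pairs` turn pairs.
--     """
--     # messages[0] = system; remainder is [u, a, u, a, ...]
--     sys_msg = messages[0]
--     pairs = []
--     for i in range(1, len(messages), 2):
--         if i + 1 < len(messages):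
--             pairs.append((messages[i], messages[i + 1]))
--     kept = pairs[-max_pairs:] if max_pairs > 0 else []
--     out: list[dict] = [sys_msg]
--     for u, a in kept:
--         out.append(u)
--         out.append(a)
--     return out
-- ===== SOURCE B (Python) =====
-- def _truncate_multiturn(messages: list[dict], max_pairs: int) -> list[dict]:
--     """Keep the system message plus the last max_pairs complete turn-pairs,
--     computed by closed-form slice arithmetic instead of building pair tuples."""
--     sys_msg = messages[0]
--     if max_pairs <= 0:
--         return [sys_msg]
--     body = messages[1:]
--     n = len(body) // 2          # number of complete (user, assistant) pairs
--     keep = min(max_pairs, n)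
--     return [sys_msg] + body[2 * (n - keep):2 * n]
-- ===== Notes on version B (the rewrite author's own statement) =====
-- stated objective: simpler
-- what changed: Replaces A's pair-tuple building loop over range(1,len,2) and the flattening output loop by closed-form slice arithmetic: keep = min(max_pairs, len(body)//2) and one contiguous slice body[2*(n-keep):2*n].
import Mathlib
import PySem

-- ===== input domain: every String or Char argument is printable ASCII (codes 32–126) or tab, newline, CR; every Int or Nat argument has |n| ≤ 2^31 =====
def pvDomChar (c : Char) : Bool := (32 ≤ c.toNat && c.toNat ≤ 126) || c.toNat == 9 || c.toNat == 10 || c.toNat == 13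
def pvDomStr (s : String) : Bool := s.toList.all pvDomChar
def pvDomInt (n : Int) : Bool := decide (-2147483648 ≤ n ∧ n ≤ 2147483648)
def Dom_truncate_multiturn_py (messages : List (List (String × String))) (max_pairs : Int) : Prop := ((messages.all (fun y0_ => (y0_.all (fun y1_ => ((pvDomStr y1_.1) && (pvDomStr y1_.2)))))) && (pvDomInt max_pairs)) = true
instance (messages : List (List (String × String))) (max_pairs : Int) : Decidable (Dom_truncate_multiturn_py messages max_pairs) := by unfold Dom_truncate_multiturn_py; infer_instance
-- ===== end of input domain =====

-- B replaces A's pair-building and flattening loops by closed-form slice arithmetic (objective: simpler).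
-- Both programs raise IndexError on empty `messages`; Pre_ excludes exactly that.
-- ===== PORT A =====
def truncate_multiturn_py (messages : List (List (String × String))) (max_pairs : Int) : List (List (String × String)) :=
  match PySem.List.pyGet? messages 0 with
  | none => []   -- messages[0] raises IndexError; excluded by Pre_
  | some sys_msg =>
    let pairs := (PySem.List.pyRange 1 (messages.length : Int) 2).foldl
      (fun acc i =>
        if i + 1 < (messages.length : Int) then
          acc ++ [(PySem.List.pyGetD messages i [], PySem.List.pyGetD messages (i + 1) [])]
        else acc) []
    let kept := if max_pairs > 0 then PySem.List.slice pairs (some (-max_pairs)) none else []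
    kept.foldl (fun out ua => out ++ [ua.1, ua.2]) [sys_msg]

-- ===== PORT B =====
def truncate_multiturn_py_alt (messages : List (List (String × String))) (max_pairs : Int) : List (List (String × String)) :=
  match PySem.List.pyGet? messages 0 with
  | none => []   -- messages[0] raises IndexError; excluded by Pre_
  | some sys_msg =>
    if max_pairs ≤ 0 then [sys_msg]
    else
      let body := PySem.List.slice messages (some 1) none
      let n : Int := PySem.Int.floordiv (body.length : Int) 2
      let keep : Int := min max_pairs n
      [sys_msg] ++ PySem.List.slice body (some (2 * (n - keep))) (some (2 * n))

-- ===== PRECONDITION & SPEC =====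
def Pre_truncate_multiturn_py (messages : List (List (String × String))) (max_pairs : Int) : Prop :=
  messages ≠ []
instance (messages : List (List (String × String))) (max_pairs : Int) : Decidable (Pre_truncate_multiturn_py messages max_pairs) := by unfold Pre_truncate_multiturn_py; infer_instance
def pvWitness_truncate_multiturn_py : (List (List (String × String))) × Int := ([[("role", "system")], [("u", "1")], [("a", "1")]], 1)
def Spec_truncate_multiturn_py (messages : List (List (String × String))) (max_pairs : Int) (out : List (List (String × String))) : Prop := out = truncate_multiturn_py_alt messages max_pairs
instance (messages : List (List (String × String))) (max_pairs : Int) (out : List (List (String × String))) : Decidable (Spec_truncate_multiturn_py messages max_pairs out) := by unfold Spec_truncate_multiturn_py; infer_instance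

-- ===== CLAIM (what is proved, stated in full; the proofs are below) =====
def Claim_equal_truncate_multiturn_py : Prop := ∀ (messages : List (List (String × String))) (max_pairs : Int), Dom_truncate_multiturn_py messages max_pairs → Pre_truncate_multiturn_py messages max_pairs → Spec_truncate_multiturn_py messages max_pairs (truncate_multiturn_py messages max_pairs)

-- ===== LEMMAS AND PROOFS =====

-- A's pairs-building loop: append-if fold = map over the filtered index list
theorem pv_foldl_if_append {T : Type} (N : Int) (g : Int → T) (l : List Int) (acc : List (T × T)) :
    l.foldl (fun acc i => if i + 1 < N then acc ++ [(g i, g (i + 1))] else acc) acc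
      = acc ++ (l.filter (fun i => decide (i + 1 < N))).map (fun i => (g i, g (i + 1))) := by
  induction l generalizing acc with
  | nil => simp
  | cons x xs ih =>
    by_cases h : x + 1 < N
    · simp [h, ih]
    · simp [h, ih]

-- A's output loop: append fold = flatMap
theorem pv_foldl_out {T : Type} (l : List (T × T)) (acc : List T) :
    l.foldl (fun out ua => out ++ [ua.1, ua.2]) acc = acc ++ l.flatMap (fun ua => [ua.1, ua.2]) := by
  induction l generalizing acc with
  | nil => simp
  | cons x xs ih => simp [ih]

-- filtering a range by an upper bound
theorem pv_filter_range (n c : Nat) :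
    (List.range c).filter (fun k => decide (k < n)) = List.range (min n c) := by
  induction c with
  | zero => simp
  | succ c ih =>
    rw [List.range_succ, List.filter_append, ih]
    by_cases h : c < n
    · have h1 : min n (c + 1) = min n c + 1 := by omega
      have h2 : min n c = c := by omega
      rw [h1, h2, List.range_succ]
      simp [h]
    · have h2 : min n (c + 1) = min n c := by omega
      rw [h2]
      simp [h]

-- flattening K consecutive element-pairs starting at pair index j = one contiguous segment
theorem pv_flat_seg {T : Type} (K j : Nat) (body : List T) (d : T)
    (h : 2 * (j + K) ≤ body.length) :
    (List.range K).flatMap (fun k => [body.getD (2 * (j + k)) d, body.getD (2 * (j + k) + 1) d])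
      = (body.drop (2 * j)).take (2 * K) := by
  induction K generalizing j with
  | zero => simp
  | succ K ih =>
    have h0 : 2 * j < body.length := by omega
    have h1 : 2 * j + 1 < body.length := by omega
    rw [List.range_succ_eq_map, List.flatMap_cons, List.flatMap_map]
    simp only [Nat.succ_eq_add_one, Nat.add_zero, List.cons_append, List.nil_append]
    rw [show (fun k : Nat => [body.getD (2 * (j + (k + 1))) d, body.getD (2 * (j + (k + 1)) + 1) d])
        = (fun k : Nat => [body.getD (2 * (j + 1 + k)) d, body.getD (2 * (j + 1 + k) + 1) d]) from by
      funext k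
      rw [show j + (k + 1) = j + 1 + k from by omega]]
    rw [ih (j + 1) (by omega)]
    rw [List.drop_eq_getElem_cons h0, List.drop_eq_getElem_cons h1]
    rw [show 2 * j + 1 + 1 = 2 * (j + 1) from by ring]
    rw [show 2 * (K + 1) = 2 * K + 1 + 1 from by ring, List.take_succ_cons, List.take_succ_cons]
    rw [List.getD_eq_getElem _ _ h0, List.getD_eq_getElem _ _ h1]

theorem truncate_multiturn_py_spec : Claim_equal_truncate_multiturn_py := by
  intro messages max_pairs hdom hpre
  unfold Spec_truncate_multiturn_py
  cases messages with
  | nil => exact absurd rfl hpre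
  | cons s body =>
    clear hdom hpre
    set L : Nat := body.length with hL
    set n : Nat := L / 2 with hn
    rw [truncate_multiturn_py, truncate_multiturn_py_alt]
    simp only [PySem.List.pyGet?_zero_cons]
    have hlen : ((s :: body).length : Int) = ((L + 1 : Nat) : Int) := by simp [hL]
    have hcnt : (if (1 : Int) < ((L + 1 : Nat) : Int)
        then ((((L + 1 : Nat) : Int) - 1 + 2 - 1) / 2).toNat else 0) = (L + 1) / 2 := by
      split_ifs with h
      · omega
      · omega
    have hrange : PySem.List.pyRange 1 ((s :: body).length : Int) 2
        = (List.range ((L + 1) / 2)).map (fun k : Nat => (1 : Int) + 2 * (k : Int)) := by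
      rw [hlen, PySem.List.pyRange_of_pos _ _ (by norm_num : (0 : Int) < 2), hcnt]
    have hpairs : ((PySem.List.pyRange 1 ((s :: body).length : Int) 2).foldl
        (fun acc i => if i + 1 < ((s :: body).length : Int) then
          acc ++ [(PySem.List.pyGetD (s :: body) i [], PySem.List.pyGetD (s :: body) (i + 1) [])]
        else acc) [])
        = (List.range n).map (fun k => (body.getD (2 * k) [], body.getD (2 * k + 1) [])) := by
      rw [pv_foldl_if_append ((s :: body).length : Int)
        (fun i => PySem.List.pyGetD (s :: body) i []), hrange, List.filter_map]
      have hcond : ((fun i => decide (i + 1 < ((s :: body).length : Int)))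
          ∘ (fun k : Nat => (1 : Int) + 2 * (k : Int))) = fun k : Nat => decide (k < n) := by
        funext k
        simp only [Function.comp_apply, decide_eq_decide, hlen, hn]
        omega
      rw [hcond, pv_filter_range]
      have hmin : min n ((L + 1) / 2) = n := by omega
      rw [hmin, List.map_map]
      apply List.map_congr_left
      intro k _
      have e1 : (1 : Int) + 2 * (k : Int) = ((2 * k + 1 : Nat) : Int) := by push_cast; ring
      have e2 : (1 : Int) + 2 * (k : Int) + 1 = ((2 * k + 2 : Nat) : Int) := by push_cast; ring
      simp only [Function.comp_apply, e1, PySem.List.pyGetD_natCast]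
      rw [show ((2 * k + 1 : Nat) : Int) + 1 = ((2 * k + 1 + 1 : Nat) : Int) from by push_cast; ring]
      simp only [PySem.List.pyGetD_natCast]
      simp
    rw [hpairs]
    have hbody : PySem.List.slice (s :: body) (some 1) none = body := by
      rw [PySem.List.slice_from_one]
      rfl
    have hnB : PySem.Int.floordiv ((body.length : Nat) : Int) 2 = (n : Int) := by
      rw [PySem.Int.floordiv, Int.fdiv_eq_ediv, if_pos (Or.inl (by norm_num : (0 : Int) ≤ 2))]
      simp only [sub_zero, hn, hL]
      omega
    by_cases hm : max_pairs > 0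
    · have hm' : ¬ (max_pairs ≤ 0) := by omega
      simp only [if_pos hm, if_neg hm', hbody, hnB]
      set k0 : Nat := min max_pairs.toNat n with hk0
      have hmneg : -max_pairs = -((max_pairs.toNat : Nat) : Int) := by omega
      rw [hmneg, PySem.List.slice_from_neg_natCast _ _ (by omega)]
      have hlenp : ((List.range n).map
          (fun k => (body.getD (2 * k) ([] : List (String × String)), body.getD (2 * k + 1) []))).length = n := by
        simp
      rw [hlenp]
      have hsplit : List.range n = List.range (n - k0) ++ (List.range k0).map (fun k => n - k0 + k) := by
        have hnk : n = (n - k0) + k0 := by omega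
        conv_lhs => rw [hnk, List.range_add]
      have hdrop : (((List.range n).map
          (fun k => (body.getD (2 * k) ([] : List (String × String)), body.getD (2 * k + 1) [])))).drop (n - max_pairs.toNat)
          = (List.range k0).map (fun k => (body.getD (2 * (n - k0 + k)) [], body.getD (2 * (n - k0 + k) + 1) [])) := by
        rw [hsplit, List.map_append]
        rw [show n - max_pairs.toNat = ((List.range (n - k0)).map
          (fun k => (body.getD (2 * k) ([] : List (String × String)), body.getD (2 * k + 1) []))).length from by
            simp only [List.length_map, List.length_range]
            omega]
        rw [List.drop_left, List.map_map]
        rfl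
      rw [hdrop]
      rw [pv_foldl_out]
      simp only [List.flatMap_map]
      rw [pv_flat_seg k0 (n - k0) body ([] : List (String × String)) (by omega)]
      have hkeep : min max_pairs ((n : Nat) : Int) = ((k0 : Nat) : Int) := by omega
      rw [hkeep]
      have ha : (0 : Int) ≤ 2 * (((n : Nat) : Int) - ((k0 : Nat) : Int)) := by omega
      rw [PySem.List.slice_toNat _ ha (by positivity)]
      have e1 : ((2 : Int) * (((n : Nat) : Int) - ((k0 : Nat) : Int))).toNat = 2 * (n - k0) := by omega
      have e2 : ((2 : Int) * ((n : Nat) : Int)).toNat = 2 * n := by omega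
      rw [e1, e2, show 2 * n - 2 * (n - k0) = 2 * k0 from by omega]
    · have hm' : max_pairs ≤ 0 := by omega
      simp [hm, hm']
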